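-- pv_equiv track=rewrite | github.com/xxpopielxx/DSA | egzaminy/1.321.py | kintersect
-- ===== SOURCE A (Python) =====
-- def kintersect(A, k):
--     intervals = []
--     i = 0
--     while i < len(A):
--         intervals.append((A[i][0],A[i][1], i))
--         i += 1
--
--     intervals.sort(key=lambda x: x[0])
--
--     max_length = -1
--     res = []
--
--     i = 0
--     while i + k <= len(intervals):
--         window = intervals[i:i+k]
--
--         max_start = window[-1][0]
--         min_end = window[0][1]
--         j = 1
--         while j < k:
--             if window[j][1] < min_end:
--                 min_end = window[j][1]
--             j += 1
--
--         length = min_end - max_start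
--         if length > max_length:
--             max_length = length
--             res = []
--             j = 0
--             while j < k:
--                 res.append(window[j][2])
--                 j += 1
--         i += 1
--
--     return res
-- ===== SOURCE B (Python) =====
-- def kintersect(A, k):
--     n = len(A)
--     order = sorted(range(n), key=lambda i: A[i][0])
--     starts = [A[i][0] for i in order]
--     ends = [A[i][1] for i in order]
--     # sliding-window minimum via a min-queue made of two stacks
--     # (each stack entry is (value, min of it and everything below it))
--     inn = []
--     out = []
--     best_len = -1
--     best_i = -1
--     for j in range(n):
--         v = ends[j]
--         m = inn[-1][1] if inn else v
--         inn.append((v, v if v < m else m))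
--         if j >= k:
--             if not out:
--                 while inn:
--                     w = inn.pop()[0]
--                     mo = out[-1][1] if out else w
--                     out.append((w, w if w < mo else mo))
--             out.pop()
--         if j >= k - 1:
--             if inn and out:
--                 mn = min(inn[-1][1], out[-1][1])
--             elif inn:
--                 mn = inn[-1][1]
--             else:
--                 mn = out[-1][1]
--             length = mn - starts[j]
--             if length > best_len:
--                 best_len = length
--                 best_i = j - k + 1
--     return order[best_i:best_i + k] if best_i >= 0 else []
-- ===== Notes on version B (the rewrite author's own statement) =====
-- stated objective: alternative
-- what changed: B sorts indices once, computes each window's min-end with an amortized O(1) two-stack min-queue in a single pass instead of A's O(k) inner rescan per window, tracks only the best window start, and slices the answer out once at the end instead of rebuilding it inside the loop; it trades A's nested rescan for queue bookkeeping (a win only when k is large).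
import Mathlib
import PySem

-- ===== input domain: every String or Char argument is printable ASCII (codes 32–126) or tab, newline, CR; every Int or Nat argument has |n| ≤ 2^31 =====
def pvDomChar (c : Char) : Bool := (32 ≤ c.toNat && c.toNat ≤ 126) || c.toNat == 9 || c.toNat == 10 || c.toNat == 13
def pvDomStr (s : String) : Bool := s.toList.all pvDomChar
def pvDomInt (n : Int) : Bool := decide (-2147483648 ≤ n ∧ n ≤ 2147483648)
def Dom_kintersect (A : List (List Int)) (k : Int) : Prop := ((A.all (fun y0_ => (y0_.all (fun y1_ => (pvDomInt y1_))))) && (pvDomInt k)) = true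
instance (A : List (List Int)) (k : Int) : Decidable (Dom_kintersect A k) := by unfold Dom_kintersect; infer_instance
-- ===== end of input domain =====

-- B replaces A's per-window rescan for the minimum end by an amortized-constant
-- two-stack min-queue and slices the answer out once at the end (objective: alternative).

-- ===== PORT A =====
-- loop body of A's window loop: rescan the window for min_end, rebuild res on improvement
def astep (k : Int) (intervals : List (Int × Int × Int)) (st : Int × List Int) (i : Int) : Int × List Int :=
  let window := PySem.List.slice intervals (some i) (some (i + k))
  let max_start := (PySem.List.pyGetD window (-1) (0, 0, 0)).1
  let min_end0 := (PySem.List.pyGetD window 0 (0, 0, 0)).2.1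
  let min_end := (PySem.List.pyRange 1 k 1).foldl (fun me j =>
      if (PySem.List.pyGetD window j (0, 0, 0)).2.1 < me then
        (PySem.List.pyGetD window j (0, 0, 0)).2.1
      else me) min_end0
  let length := min_end - max_start
  if st.1 < length then
    (length, (PySem.List.pyRange 0 k 1).foldl
      (fun r j => r ++ [(PySem.List.pyGetD window j (0, 0, 0)).2.2]) [])
  else st

def kintersect (A : List (List Int)) (k : Int) : List Int :=
  let n : Int := (A.length : Int)
  let intervals : List (Int × Int × Int) :=
    (PySem.List.pyRange 0 n 1).foldl (fun acc i =>
      acc ++ [(PySem.List.pyGetD (PySem.List.pyGetD A i []) 0 0,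
               PySem.List.pyGetD (PySem.List.pyGetD A i []) 1 0, i)]) []
  let intervals := PySem.List.sorted intervals (fun x => x.1) false
  ((PySem.List.pyRange 0 (n - k + 1) 1).foldl (astep k intervals) (-1, [])).2

-- ===== PORT B =====
-- Source B's push: put (value, running min) on top of a stack
def pushQ (s : List (Int × Int)) (v : Int) : List (Int × Int) :=
  let m := match s with | [] => v | (_, m) :: _ => m
  (v, if v < m then v else m) :: s

-- Source B's transfer loop: move everything from the in-stack onto the out-stack
def transferQ (inn : List (Int × Int)) : List (Int × Int) :=
  inn.foldl (fun o p => pushQ o p.1) []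

-- Source B's front minimum of the queue ([],[] is unreachable: Python raises there)
def qminQ (inn out : List (Int × Int)) : Int :=
  match inn, out with
  | (_, mi) :: _, (_, mo) :: _ => min mi mo
  | (_, mi) :: _, [] => mi
  | [], (_, mo) :: _ => mo
  | [], [] => 0

-- loop body of Source B's single pass: push ends[j], pop when j >= k, score the window
def bstep (k : Int) (starts ends : List Int) :
    (List (Int × Int) × List (Int × Int) × Int × Int) → Int →
    List (Int × Int) × List (Int × Int) × Int × Int
  | (inn0, out0, bl, bi), j =>
    let inn := pushQ inn0 (PySem.List.pyGetD ends j 0)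
    let io : List (Int × Int) × List (Int × Int) :=
      if k ≤ j then
        if out0 = [] then (([] : List (Int × Int)), (transferQ inn).tail) else (inn, out0.tail)
      else (inn, out0)
    if k - 1 ≤ j then
      let length := qminQ io.1 io.2 - PySem.List.pyGetD starts j 0
      if bl < length then (io.1, io.2, length, j - k + 1)
      else (io.1, io.2, bl, bi)
    else (io.1, io.2, bl, bi)

def kintersect_alt (A : List (List Int)) (k : Int) : List Int :=
  let n : Int := (A.length : Int)
  let order := PySem.List.sorted (PySem.List.pyRange 0 n 1)
      (fun i => PySem.List.pyGetD (PySem.List.pyGetD A i []) 0 0) false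
  let starts := order.map (fun i => PySem.List.pyGetD (PySem.List.pyGetD A i []) 0 0)
  let ends := order.map (fun i => PySem.List.pyGetD (PySem.List.pyGetD A i []) 1 0)
  let st := (PySem.List.pyRange 0 n 1).foldl (bstep k starts ends) ([], [], -1, -1)
  if 0 ≤ st.2.2.2 then PySem.List.slice order (some st.2.2.2) (some (st.2.2.2 + k)) else []

-- ===== PRECONDITION & SPEC =====
-- A raises IndexError when k ≤ 0 (window[-1] on an empty slice) or when some row of A
-- has fewer than 2 entries (A[i][1]); Pre_ excludes exactly those inputs.
def Pre_kintersect (A : List (List Int)) (k : Int) : Prop := 1 ≤ k ∧ ∀ r ∈ A, 2 ≤ r.length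
instance (A : List (List Int)) (k : Int) : Decidable (Pre_kintersect A k) := by unfold Pre_kintersect; infer_instance

def pvWitness_kintersect : List (List Int) × Int := ([[0, 5], [1, 4], [2, 9]], 2)

def Spec_kintersect (A : List (List Int)) (k : Int) (out : List Int) : Prop := out = kintersect_alt A k
instance (A : List (List Int)) (k : Int) (out : List Int) : Decidable (Spec_kintersect A k out) := by unfold Spec_kintersect; infer_instance

-- ===== CLAIM (what is proved, stated in full; the proofs are below) =====
def Claim_equal_kintersect : Prop := ∀ (A : List (List Int)) (k : Int), Dom_kintersect A k → Pre_kintersect A k → Spec_kintersect A k (kintersect A k)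

-- ===== LEMMAS AND PROOFS =====

def minL : List Int → Int
  | [] => 0
  | v :: t => t.foldl min v

def annQ (l : List Int) : List (Int × Int) := l.foldr (fun v s => pushQ s v) []

lemma annQ_cons (v : Int) (t : List Int) : annQ (v :: t) = pushQ (annQ t) v := rfl

lemma annQ_nil : annQ [] = [] := rfl

lemma annQ_cons_ne_nil (v : Int) (t : List Int) : annQ (v :: t) ≠ [] := by
  simp [annQ_cons, pushQ]

lemma map_fst_annQ (l : List Int) : (annQ l).map Prod.fst = l := by
  induction l with
  | nil => rfl
  | cons v t ih => simp [annQ_cons, pushQ, ih]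

lemma annQ_tail (v : Int) (t : List Int) : (annQ (v :: t)).tail = annQ t := by
  simp [annQ_cons, pushQ]

lemma foldl_min_min (l : List Int) : ∀ a b, l.foldl min (min a b) = min a (l.foldl min b) := by
  induction l with
  | nil => intro a b; rfl
  | cons x t ih =>
    intro a b
    simp only [List.foldl_cons, min_assoc]
    exact ih a (min b x)

lemma minL_cons_cons (a b : Int) (t : List Int) : minL (a :: b :: t) = min a (minL (b :: t)) := by
  simp only [minL, List.foldl_cons]
  exact foldl_min_min t a b

lemma minL_append (xs ys : List Int) (hx : xs ≠ []) (hy : ys ≠ []) :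
    minL (xs ++ ys) = min (minL xs) (minL ys) := by
  induction xs with
  | nil => simp at hx
  | cons v t ih =>
    cases t with
    | nil =>
      cases ys with
      | nil => simp at hy
      | cons b t' => simpa using minL_cons_cons v b t'
    | cons b t' =>
      have h2 := ih (by simp)
      have e1 : (v :: b :: t') ++ ys = v :: ((b :: t') ++ ys) := rfl
      have e2 : (b :: t') ++ ys = b :: (t' ++ ys) := rfl
      rw [e1, e2, minL_cons_cons, ← e2, h2, minL_cons_cons, min_assoc]

lemma minL_concat (xs : List Int) (a : Int) (hx : xs ≠ []) :
    minL (xs ++ [a]) = min (minL xs) a := by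
  rw [minL_append xs [a] hx (by simp)]; rfl

lemma minL_reverse (l : List Int) : minL l.reverse = minL l := by
  induction l with
  | nil => rfl
  | cons v t ih =>
    cases t with
    | nil => rfl
    | cons b t' =>
      rw [minL_cons_cons, ← ih, List.reverse_cons, minL_concat _ _ (by simp), min_comm]

lemma ite_lt_eq_min (v m : Int) : (if v < m then v else m) = min v m := by
  by_cases h : v < m
  · rw [if_pos h, min_eq_left h.le]
  · rw [if_neg h, min_eq_right (not_lt.mp h)]

lemma annQ_head_snd (v : Int) (t : List Int) :
    ∃ rest, annQ (v :: t) = (v, minL (v :: t)) :: rest := by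
  induction t generalizing v with
  | nil => exact ⟨[], by show (v, if v < v then v else v) :: [] = _; simp [minL]⟩
  | cons b t' ih =>
    obtain ⟨rest, hr⟩ := ih b
    refine ⟨(b, minL (b :: t')) :: rest, ?_⟩
    rw [annQ_cons, hr]
    show (v, if v < minL (b :: t') then v else minL (b :: t')) :: _ = _
    rw [ite_lt_eq_min, minL_cons_cons]

lemma foldl_pushQ (xs : List Int) : ∀ ys, xs.foldl (fun s v => pushQ s v) (annQ ys) = annQ (xs.reverse ++ ys) := by
  induction xs with
  | nil => intro ys; rfl
  | cons x t ih =>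
    intro ys
    have : (x :: t).reverse ++ ys = t.reverse ++ (x :: ys) := by simp
    rw [this, List.foldl_cons, ← annQ_cons, ih]

lemma transferQ_annQ (l : List Int) : transferQ (annQ l) = annQ l.reverse := by
  have h1 : transferQ (annQ l) = ((annQ l).map Prod.fst).foldl (fun s v => pushQ s v) [] := by
    rw [List.foldl_map]; rfl
  rw [h1, map_fst_annQ, ← annQ_nil, foldl_pushQ, List.append_nil]

lemma qminQ_annQ (iv ov : List Int) (h : ov ++ iv.reverse ≠ []) :
    qminQ (annQ iv) (annQ ov) = minL (ov ++ iv.reverse) := by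
  cases iv with
  | nil =>
    cases ov with
    | nil => simp at h
    | cons o ot =>
      obtain ⟨r, hr⟩ := annQ_head_snd o ot
      simp [annQ_nil, hr, qminQ]
  | cons v t =>
    obtain ⟨r, hr⟩ := annQ_head_snd v t
    cases ov with
    | nil =>
      obtain ⟨r2, hr2⟩ := annQ_head_snd v t
      simp only [annQ_nil, hr, qminQ, List.nil_append]
      rw [minL_reverse]
    | cons o ot =>
      obtain ⟨r2, hr2⟩ := annQ_head_snd o ot
      simp only [hr, hr2, qminQ]
      rw [minL_append _ _ (by simp) (by simp), minL_reverse, min_comm]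

lemma insertBy_map {α β : Type} (f : α → β) (pa : α → α → Bool) (pb : β → β → Bool)
    (h : ∀ a b, pb (f a) (f b) = pa a b) (x : α) (l : List α) :
    PySem.List.insertBy pb (f x) (l.map f) = (PySem.List.insertBy pa x l).map f := by
  induction l with
  | nil => simp [PySem.List.insertBy]
  | cons y ys ih =>
    simp only [List.map_cons, PySem.List.insertBy, h]
    by_cases hc : pa x y = true
    · simp [hc]
    · simp only [hc]
      simp at hc
      simp [ih]

lemma sorted_map_comm {α β : Type} (f : α → β) (keya : α → Int) (keyb : β → Int)
    (h : ∀ a, keyb (f a) = keya a) (xs : List α) :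
    PySem.List.sorted (xs.map f) keyb false = (PySem.List.sorted xs keya false).map f := by
  rw [PySem.List.sorted_eq_foldl_insertBy, PySem.List.sorted_eq_foldl_insertBy]
  suffices H : ∀ acc : List α,
      (xs.map f).foldl (fun acc x => PySem.List.insertBy (fun a b => decide (keyb a < keyb b)) x acc) (acc.map f)
      = (xs.foldl (fun acc x => PySem.List.insertBy (fun a b => decide (keya a < keya b)) x acc) acc).map f by
    simpa using H []
  induction xs with
  | nil => intro acc; rfl
  | cons x t ih =>
    intro acc
    simp only [List.map_cons, List.foldl_cons]
    rw [insertBy_map f (fun a b => decide (keya a < keya b)) (fun a b => decide (keyb a < keyb b)) (by intro a b; simp only []; rw [h, h]) x acc]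
    exact ih _

lemma foldl_sim {σ τ ι : Type} (R : σ → τ → Prop) (f : σ → ι → σ) (g : τ → ι → τ)
    (l : List ι) : ∀ (s0 : σ) (t0 : τ), R s0 t0 → (∀ s t x, x ∈ l → R s t → R (f s x) (g t x)) →
    R (l.foldl f s0) (l.foldl g t0) := by
  induction l with
  | nil => intro s0 t0 h0 _; exact h0
  | cons x t ih =>
    intro s0 t0 h0 hstep
    exact ih _ _ (hstep _ _ _ (by simp) h0) (fun s t' x' hx => hstep s t' x' (by simp [hx]))

def wslice {γ : Type} (S : List γ) (kn i : Nat) : List γ := List.take kn (List.drop i S)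

def lenA (S : List (Int × Int × Int)) (kn i : Nat) : Int :=
  minL ((wslice S kn i).map (fun x => x.2.1)) - ((wslice S kn i).map (fun x => x.1)).getD (kn - 1) 0

def resA (S : List (Int × Int × Int)) (kn i : Nat) : List Int := (wslice S kn i).map (fun x => x.2.2)

lemma astep_eq (S : List (Int × Int × Int)) (kn i : Nat) (hkn : 1 ≤ kn) (hi : i + kn ≤ S.length)
    (st : Int × List Int) :
    astep (kn : Int) S st (i : Int) = if st.1 < lenA S kn i then (lenA S kn i, resA S kn i) else st := by
  have hw : PySem.List.slice S (some (i : Int)) (some ((i : Int) + (kn : Int))) = wslice S kn i :=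
    PySem.List.slice_natCast_add S i kn
  have hlen : (wslice S kn i).length = kn := by
    simp only [wslice, List.length_take, List.length_drop]; omega
  have hne : wslice S kn i ≠ [] := by
    intro hnil; rw [hnil] at hlen; simp at hlen; omega
  obtain ⟨w0, rest, hcons⟩ : ∃ w0 rest, wslice S kn i = w0 :: rest := by
    cases hW : wslice S kn i with
    | nil => exact absurd hW hne
    | cons a b => exact ⟨a, b, rfl⟩
  have hms : (PySem.List.pyGetD (wslice S kn i) (-1) (0, 0, 0)).1 =
      (((wslice S kn i).map (fun x => x.1)).getD (kn - 1) 0) := by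
    rw [PySem.List.pyGetD_neg_one _ _ hne]
    have hk1 : kn - 1 < (wslice S kn i).length := by omega
    rw [List.getLast_eq_getElem]
    rw [List.getD_eq_getElem (((wslice S kn i).map (fun x => x.1))) 0 (by simpa using hk1)]
    simp [hlen]
  have hme : (PySem.List.pyRange 1 (kn : Int) 1).foldl (fun me j =>
      if (PySem.List.pyGetD (wslice S kn i) j (0, 0, 0)).2.1 < me then
        (PySem.List.pyGetD (wslice S kn i) j (0, 0, 0)).2.1 else me)
      ((PySem.List.pyGetD (wslice S kn i) 0 (0, 0, 0)).2.1) = minL ((wslice S kn i).map (fun x => x.2.1)) := by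
    have hcast : (kn : Int) = ((wslice S kn i).length : Int) := by rw [hlen]
    rw [hcast, PySem.List.foldl_pyRange_pyGetD' (wslice S kn i) (0, 0, 0)
      (fun me w => if w.2.1 < me then w.2.1 else me) _ (by norm_num)]
    rw [hcons]
    simp only [Int.toNat_one, List.drop_succ_cons, List.drop_zero, List.map_cons, minL,
      List.foldl_map, PySem.List.pyGetD_zero_cons]
    exact PySem.List.foldl_congr_mem rest _ _ _ (fun acc x _ => by rw [ite_lt_eq_min, min_comm])
  have hres : (PySem.List.pyRange 0 (kn : Int) 1).foldl
      (fun r j => r ++ [(PySem.List.pyGetD (wslice S kn i) j (0, 0, 0)).2.2]) [] = resA S kn i := by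
    have hcast : (kn : Int) = ((wslice S kn i).length : Int) := by rw [hlen]
    rw [hcast, PySem.List.foldl_append_singleton_eq_map
      (fun j => (PySem.List.pyGetD (wslice S kn i) j (0, 0, 0)).2.2)]
    have hmm : List.map (fun j => (PySem.List.pyGetD (wslice S kn i) j (0, 0, 0)).2.2)
        (PySem.List.pyRange 0 ((wslice S kn i).length : Int)) =
        List.map (fun x => x.2.2) (List.map (fun j => PySem.List.pyGetD (wslice S kn i) j (0, 0, 0))
          (PySem.List.pyRange 0 ((wslice S kn i).length : Int))) := by
      rw [List.map_map]; rfl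
    rw [hmm, PySem.List.map_pyGetD_pyRange_zero' (wslice S kn i) (0, 0, 0)]
    rfl
  unfold astep
  simp only [hw, hms, hme, hres, lenA]

def rstep (S : List (Int × Int × Int)) (kn : Nat) (st : Int × Int) (i : Nat) : Int × Int :=
  if st.1 < lenA S kn i then (lenA S kn i, (i : Int)) else st

def Cwin (EL : List Int) (kn j : Nat) : List Int := (EL.take j).drop (j - kn)

lemma Cwin_zero (EL : List Int) (kn : Nat) : Cwin EL kn 0 = [] := by simp [Cwin]

lemma Cwin_push (EL : List Int) (kn j : Nat) (hj : j < kn) (hjn : j < EL.length) :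
    Cwin EL kn j ++ [EL.getD j 0] = Cwin EL kn (j + 1) := by
  unfold Cwin
  rw [Nat.sub_eq_zero_of_le hj.le, Nat.sub_eq_zero_of_le hj, List.drop_zero, List.drop_zero,
    List.getD_eq_getElem _ _ hjn, ← List.take_concat_get']

lemma Cwin_pop (EL : List Int) (kn j : Nat) (hj : kn ≤ j) (hjn : j < EL.length) :
    (Cwin EL kn j ++ [EL.getD j 0]).tail = Cwin EL kn (j + 1) := by
  unfold Cwin
  rw [List.getD_eq_getElem _ _ hjn, ← List.drop_append_of_le_length (by simp; omega),
    List.take_concat_get', List.tail_drop]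
  congr 1
  omega

lemma Cwin_eq_wslice (EL : List Int) (kn j : Nat) (hj : kn ≤ j + 1) :
    Cwin EL kn (j + 1) = wslice EL kn (j + 1 - kn) := by
  unfold Cwin wslice
  rw [List.drop_take]
  congr 1
  omega

lemma wslice_map {γ δ : Type} (f : γ → δ) (S : List γ) (kn i : Nat) :
    wslice (S.map f) kn i = (wslice S kn i).map f := by
  unfold wslice
  rw [List.map_take, List.map_drop]

lemma length_wslice {γ : Type} (S : List γ) (kn i : Nat) (h : i + kn ≤ S.length) :
    (wslice S kn i).length = kn := by
  simp only [wslice, List.length_take, List.length_drop]; omega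

lemma binv (S : List (Int × Int × Int)) (kn : Nat) (hkn : 1 ≤ kn) :
    ∀ j, j ≤ S.length → ∃ iv ov,
      (List.range j).foldl
        (fun st (jn : Nat) => bstep (kn : Int) (S.map (fun x => x.1)) (S.map (fun x => x.2.1)) st (jn : Int))
        ([], [], -1, -1)
      = (annQ iv, annQ ov, (List.range (j + 1 - kn)).foldl (rstep S kn) (-1, -1))
      ∧ ov ++ iv.reverse = Cwin (S.map (fun x => x.2.1)) kn j := by
  intro j
  induction j with
  | zero =>
    intro _
    refine ⟨[], [], ?_, by simp [Cwin_zero]⟩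
    rw [Nat.sub_eq_zero_of_le (by omega)]
    rfl
  | succ j ih =>
    intro hj1
    have hjn : j < S.length := by omega
    obtain ⟨iv, ov, hst, hcont⟩ := ih (by omega)
    rw [List.range_succ, List.foldl_append, hst]
    set EL := S.map (fun x => x.2.1) with hEL
    have hELlen : EL.length = S.length := by simp [hEL]
    simp only [List.foldl_cons, List.foldl_nil]
    rcases hP : (List.range (j + 1 - kn)).foldl (rstep S kn) (-1, -1) with ⟨bl, bi⟩
    have hv : PySem.List.pyGetD EL (j : Int) 0 = EL.getD j 0 := by
      simp [PySem.List.pyGetD_natCast]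
    -- the queue after push and (possible) pop
    have hio : ∃ iv' ov',
        (if (kn : Int) ≤ (j : Int) then
          if annQ ov = [] then (([] : List (Int × Int)), (transferQ (pushQ (annQ iv) (PySem.List.pyGetD EL (j : Int) 0))).tail)
          else (pushQ (annQ iv) (PySem.List.pyGetD EL (j : Int) 0), (annQ ov).tail)
        else (pushQ (annQ iv) (PySem.List.pyGetD EL (j : Int) 0), annQ ov))
        = (annQ iv', annQ ov') ∧ ov' ++ iv'.reverse = Cwin EL kn (j + 1) := by
      rw [hv, ← annQ_cons]
      rcases Nat.lt_or_ge j kn with hlt | hge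
      · rw [if_neg (by exact_mod_cast Nat.not_le.mpr hlt)]
        refine ⟨EL.getD j 0 :: iv, ov, rfl, ?_⟩
        rw [← Cwin_push EL kn j hlt (by omega), ← hcont]
        simp
      · rw [if_pos (by exact_mod_cast hge)]
        rcases ov with _ | ⟨o, ot⟩
        · rw [if_pos (show annQ ([] : List Int) = [] from rfl), transferQ_annQ]
          obtain ⟨c, cs, hrev⟩ : ∃ c cs, (EL.getD j 0 :: iv).reverse = c :: cs := by
            cases hr : (EL.getD j 0 :: iv).reverse with
            | nil => exact absurd hr (by simp)
            | cons a b => exact ⟨a, b, rfl⟩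
          rw [hrev]
          refine ⟨[], cs, by rw [annQ_tail]; rfl, ?_⟩
          have h1 : Cwin EL kn j ++ [EL.getD j 0] = c :: cs := by
            rw [← hcont, List.nil_append, ← List.reverse_cons, hrev]
          rw [← Cwin_pop EL kn j hge (by omega), h1]
          simp
        · rw [if_neg (annQ_cons_ne_nil o ot), annQ_tail]
          refine ⟨EL.getD j 0 :: iv, ot, rfl, ?_⟩
          rw [← Cwin_pop EL kn j hge (by omega), ← hcont]
          simp
    obtain ⟨iv', ov', hio, hcont'⟩ := hio
    rcases Nat.lt_or_ge j (kn - 1) with hlt | hge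
    · -- no window ends at j
      have h2 : ¬ ((kn : Int) - 1 ≤ (j : Int)) := by omega
      have h1 : ¬ ((kn : Int) ≤ (j : Int)) := by omega
      refine ⟨iv', ov', ?_, hcont'⟩
      show (if (kn : Int) - 1 ≤ (j : Int) then _ else _) = _
      rw [if_neg h2]
      have h3 : j + 1 + 1 - kn = j + 1 - kn := by omega
      rw [h3, hP, hio]
    · -- window i = j + 1 - kn ends at j
      have h2 : ((kn : Int) - 1 ≤ (j : Int)) := by omega
      have hk1 : kn ≤ j + 1 := by omega
      have hiw : (j + 1 - kn) + kn ≤ S.length := by omega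
      have hwl : Cwin EL kn (j + 1) = (wslice S kn (j + 1 - kn)).map (fun x => x.2.1) := by
        rw [Cwin_eq_wslice EL kn j hk1, hEL, wslice_map]
      have hne : ov' ++ iv'.reverse ≠ [] := by
        rw [hcont', hwl]
        intro hnil
        have := congrArg List.length hnil
        rw [List.length_map, length_wslice S kn _ hiw] at this
        simp at this; omega
      have hq : qminQ (annQ iv') (annQ ov') = minL (Cwin EL kn (j + 1)) := by
        rw [qminQ_annQ iv' ov' hne, hcont']
      have hs : PySem.List.pyGetD (S.map (fun x => x.1)) (j : Int) 0
          = ((wslice S kn (j + 1 - kn)).map (fun x => x.1)).getD (kn - 1) 0 := by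
        rw [PySem.List.pyGetD_natCast]
        rw [← wslice_map (fun x => x.1) S kn (j + 1 - kn)]
        unfold wslice
        rw [List.getD_eq_getElem _ _ (by rw [List.length_map]; omega),
          List.getD_eq_getElem _ _ (by rw [List.length_take, List.length_drop, List.length_map]; omega)]
        rw [List.getElem_take, List.getElem_drop]
        congr 1
        omega
      have hlen : qminQ (annQ iv') (annQ ov') - PySem.List.pyGetD (S.map (fun x => x.1)) (j : Int) 0
          = lenA S kn (j + 1 - kn) := by
        rw [hq, hs, hwl, lenA]
      have hrs : (List.range (j + 1 + 1 - kn)).foldl (rstep S kn) (-1, -1)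
          = rstep S kn (bl, bi) (j + 1 - kn) := by
        have h3 : j + 1 + 1 - kn = (j + 1 - kn) + 1 := by omega
        rw [h3, List.range_succ, List.foldl_append, hP]
        rfl
      refine ⟨iv', ov', ?_, hcont'⟩
      show (if (kn : Int) - 1 ≤ (j : Int) then _ else _) = _
      rw [if_pos h2, hrs]
      unfold rstep
      rcases hio_eq : (if (kn : Int) ≤ (j : Int) then
          if annQ ov = [] then (([] : List (Int × Int)), (transferQ (pushQ (annQ iv) (PySem.List.pyGetD EL (j : Int) 0))).tail)
          else (pushQ (annQ iv) (PySem.List.pyGetD EL (j : Int) 0), (annQ ov).tail)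
        else (pushQ (annQ iv) (PySem.List.pyGetD EL (j : Int) 0), annQ ov)) with ⟨qa, qb⟩
      rw [hio_eq] at hio
      have hqa : qa = annQ iv' := congrArg Prod.fst hio
      have hqb : qb = annQ ov' := congrArg Prod.snd hio
      subst hqa hqb
      rw [hlen]
      by_cases hc : bl < lenA S kn (j + 1 - kn)
      · rw [if_pos hc, if_pos hc]
        have h4 : (j : Int) - (kn : Int) + 1 = ((j + 1 - kn : Nat) : Int) := by push_cast [hk1]; omega
        rw [h4]
      · rw [if_neg hc, if_neg hc]

def keyF (A : List (List Int)) : Int → Int := fun i => PySem.List.pyGetD (PySem.List.pyGetD A i []) 0 0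

def endF (A : List (List Int)) : Int → Int := fun i => PySem.List.pyGetD (PySem.List.pyGetD A i []) 1 0

def tripF (A : List (List Int)) : Int → Int × Int × Int := fun i => (keyF A i, endF A i, i)

def ordL (A : List (List Int)) : List Int :=
  PySem.List.sorted (PySem.List.pyRange 0 (A.length : Int) 1) (keyF A) false

def srtL (A : List (List Int)) : List (Int × Int × Int) := (ordL A).map (tripF A)

lemma length_ordL (A : List (List Int)) : (ordL A).length = A.length := by
  unfold ordL
  rw [PySem.List.length_sorted, PySem.List.length_pyRange_one]
  omega

lemma length_srtL (A : List (List Int)) : (srtL A).length = A.length := by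
  unfold srtL
  rw [List.length_map, length_ordL]

lemma resA_srtL (A : List (List Int)) (kn i : Nat) : resA (srtL A) kn i = wslice (ordL A) kn i := by
  unfold resA srtL
  rw [wslice_map (tripF A) (ordL A) kn i, List.map_map]
  simp [tripF, Function.comp_def]

theorem main_eq (A : List (List Int)) (kn : Nat) (hkn : 1 ≤ kn) :
    kintersect A (kn : Int) = kintersect_alt A (kn : Int) := by
  simp only [kintersect, kintersect_alt]
  rw [PySem.List.foldl_append_singleton_eq_map
    (fun i => (PySem.List.pyGetD (PySem.List.pyGetD A i []) 0 0,
               PySem.List.pyGetD (PySem.List.pyGetD A i []) 1 0, i))]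
  rw [show (fun i => (PySem.List.pyGetD (PySem.List.pyGetD A i []) 0 0,
               PySem.List.pyGetD (PySem.List.pyGetD A i []) 1 0, (i : Int))) = tripF A from rfl]
  rw [List.nil_append]
  rw [sorted_map_comm (tripF A) (keyF A) (fun x => x.1) (fun a => rfl)]
  rw [show (fun i => PySem.List.pyGetD (PySem.List.pyGetD A i []) 0 0) = keyF A from rfl]
  rw [show (fun i => PySem.List.pyGetD (PySem.List.pyGetD A i []) 1 0) = endF A from rfl]
  rw [show PySem.List.sorted (PySem.List.pyRange 0 ((A.length : Int)) 1) (keyF A) false = ordL A from rfl]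
  rw [show (ordL A).map (tripF A) = srtL A from rfl]
  have hst : (ordL A).map (keyF A) = (srtL A).map (fun x => x.1) := by
    unfold srtL; rw [List.map_map]; rfl
  have hen : (ordL A).map (endF A) = (srtL A).map (fun x => x.2.1) := by
    unfold srtL; rw [List.map_map]; rfl
  rw [hst, hen, PySem.List.pyRange_zero_nat A.length, List.foldl_map]
  obtain ⟨iv, ov, hstq, -⟩ := binv (srtL A) kn hkn A.length (by rw [length_srtL])
  rw [hstq]
  dsimp only
  rcases Nat.lt_or_ge A.length kn with hlt | hge
  · -- k > n: no window at all, both sides return []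
    rw [PySem.List.pyRange_one_eq_nil (by omega : (A.length : Int) - (kn : Int) + 1 ≤ 0)]
    rw [show A.length + 1 - kn = 0 from by omega]
    norm_num
  · -- k ≤ n
    have hbound : ((A.length : Int) - (kn : Int) + 1) = ((A.length + 1 - kn : Nat) : Int) := by omega
    rw [hbound, PySem.List.pyRange_zero_nat, List.foldl_map]
    have hsim := foldl_sim
      (fun (s : Int × List Int) (t : Int × Int) => s.1 = t.1 ∧
        s.2 = (if 0 ≤ t.2 then resA (srtL A) kn t.2.toNat else []) ∧
        (t.2 = -1 ∨ ∃ i : Nat, i + kn ≤ A.length ∧ t.2 = (i : Int)))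
      (fun st (i : Nat) => astep (kn : Int) (srtL A) st (i : Int))
      (rstep (srtL A) kn)
      (List.range (A.length + 1 - kn)) (-1, ([] : List Int)) (-1, -1)
      ⟨rfl, by norm_num, Or.inl rfl⟩
      ?step
    case step =>
      rintro s t x hx ⟨h1, h2, h3⟩
      dsimp only
      have hxm : x + kn ≤ A.length := by
        have := List.mem_range.mp hx; omega
      rw [astep_eq (srtL A) kn x hkn (by rw [length_srtL]; exact hxm)]
      unfold rstep
      rw [h1]
      by_cases hc : t.1 < lenA (srtL A) kn x
      · rw [if_pos hc, if_pos hc]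
        refine ⟨rfl, ?_, Or.inr ⟨x, hxm, rfl⟩⟩
        simp
      · rw [if_neg hc, if_neg hc]
        exact ⟨h1, h2, h3⟩
    obtain ⟨-, h2, h3⟩ := hsim
    rw [h2]
    rcases h3 with h3 | ⟨i, hile, h3⟩
    · rw [h3]; norm_num
    · rw [h3]
      rw [if_pos (by positivity), if_pos (by positivity)]
      rw [Int.toNat_natCast, resA_srtL, PySem.List.slice_natCast_add]
      rfl

-- ===== VERDICT (by name: the statement is the Claim_ definition above) =====
theorem kintersect_spec : Claim_equal_kintersect := by
  intro A k _ hpre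
  obtain ⟨hk1, -⟩ := hpre
  unfold Spec_kintersect
  have hk : k = (k.toNat : Int) := by omega
  rw [hk]
  exact main_eq A k.toNat (by omega)
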